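-- pv_equiv track=rewrite | github.com/liukun/WenZi | src/wenzi/enhance/repetition.py | _find_repeating_pattern
-- ===== SOURCE A (Python) =====
-- from typing import Optional, Tuple
--
-- _MIN_REPEATED_CHARS = 20
--
-- _MIN_REPEATS = 4
--
-- def _find_repeating_pattern(
--     tail: str,
--     min_repeated_chars: int = _MIN_REPEATED_CHARS,
--     min_repeats: int = _MIN_REPEATS,
-- ) -> Optional[Tuple[str, int]]:
--     """Find a repeating pattern at the end of *tail*.
--
--     Returns ``(pattern, needed_repeats)`` if found, or ``None``.
--     """
--     if not tail:
--         return None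
--
--     max_pat_len = len(tail) // min_repeats
--     for pat_len in range(1, max_pat_len + 1):
--         needed = max(min_repeats, min_repeated_chars // pat_len)
--         if pat_len * needed > len(tail):
--             continue
--
--         pattern = tail[-pat_len:]
--         if not pattern.strip():
--             continue
--
--         matched = True
--         for i in range(1, needed):
--             start = len(tail) - pat_len * (i + 1)
--             if start < 0 or tail[start : start + pat_len] != pattern:
--                 matched = False
--                 break
--         if matched:
--             return pattern, needed
--
--     return None
-- ===== SOURCE B (Python) =====
-- from typing import Optional, Tuple
--
-- _MIN_REPEATED_CHARS = 20
--
-- _MIN_REPEATS = 4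
--
--
-- def _find_repeating_pattern(
--     tail: str,
--     min_repeated_chars: int = _MIN_REPEATED_CHARS,
--     min_repeats: int = _MIN_REPEATS,
-- ) -> Optional[Tuple[str, int]]:
--     """Find a repeating pattern at the end of *tail* (Z-function variant).
--
--     Work on the reversed string: one linear Z-algorithm pass gives
--     z[i] = lcp(rev, rev[i:]) for every candidate length i, and one scan
--     gives the leading-whitespace count of rev.  The last needed*p chars
--     of tail are p-periodic iff z[p] >= needed*p - p, so each candidate
--     is then decided by pure arithmetic, with no string comparison in the
--     candidate loop.
--     """
--     if not tail:
--         return None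
--
--     n = len(tail)
--     rev = tail[::-1]
--     max_p = n // min_repeats
--
--     # Z-algorithm (restricted to the indices 1..max_p we need; the l/r
--     # window only ever refers to smaller indices, so this is exact).
--     z = [0] * (max_p + 1)
--     l = r = 0
--     for i in range(1, max_p + 1):
--         k = min(z[i - l], r - i) if i < r else 0
--         while i + k < n and rev[k] == rev[i + k]:
--             k += 1
--         z[i] = k
--         if i + k > r:
--             l, r = i, i + k
--
--     ws = 0
--     while ws < n and rev[ws].isspace():
--         ws += 1
--
--     for p in range(1, max_p + 1):
--         needed = max(min_repeats, min_repeated_chars // p)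
--         total = p * needed
--         if total <= n and p > ws and z[p] >= total - p:
--             return rev[:p][::-1], needed
--     return None
-- ===== Notes on version B (the rewrite author's own statement) =====
-- stated objective: alternative
-- what changed: Replaces A's per-candidate inner loop comparing repeat blocks with a single linear Z-algorithm pass over the reversed tail (z[p] = lcp(rev, rev[p:])) plus one whitespace count, after which each candidate length is decided by the arithmetic test z[p] >= needed*p - p with no string comparison in the candidate loop.
import Mathlib
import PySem

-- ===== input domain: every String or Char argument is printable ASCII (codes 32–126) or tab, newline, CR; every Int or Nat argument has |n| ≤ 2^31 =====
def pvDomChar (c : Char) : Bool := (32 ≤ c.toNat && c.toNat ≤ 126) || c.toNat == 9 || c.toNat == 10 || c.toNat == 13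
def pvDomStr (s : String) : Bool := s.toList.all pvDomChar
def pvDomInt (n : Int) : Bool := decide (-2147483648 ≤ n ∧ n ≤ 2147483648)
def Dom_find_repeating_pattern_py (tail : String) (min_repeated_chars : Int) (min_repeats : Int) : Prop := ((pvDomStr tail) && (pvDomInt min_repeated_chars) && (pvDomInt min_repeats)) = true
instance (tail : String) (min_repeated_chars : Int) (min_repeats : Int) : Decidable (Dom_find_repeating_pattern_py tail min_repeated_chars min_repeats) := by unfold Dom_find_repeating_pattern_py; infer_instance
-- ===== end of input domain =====

-- B replaces A's per-candidate inner block-comparison loop by one linear Z-algorithm pass over the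
-- reversed tail plus a whitespace count, deciding each candidate length by arithmetic (alternative).

-- ===== PORT A =====
-- inner 'for i in range(1, needed)' loop with its early break ('matched' flag)
def pvInnerA (cs : List Char) (n p : Int) (pattern : List Char) : List Int → Bool
  | [] => true
  | i :: rest =>
      let start := n - p * (i + 1)
      if start < 0 ∨ PySem.List.slice cs (some start) (some (start + p)) ≠ pattern then false
      else pvInnerA cs n p pattern rest

-- outer 'for pat_len in range(1, max_pat_len + 1)' loop with its early return
def pvLoopA (cs : List Char) (n mrc mr : Int) : List Int → Option (String × Int)
  | [] => none
  | p :: rest =>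
      let needed := max mr (PySem.Int.floordiv mrc p)
      if p * needed > n then pvLoopA cs n mrc mr rest
      else
        let pattern := PySem.List.slice cs (some (-p)) none
        if PySem.Chars.strip pattern = [] then pvLoopA cs n mrc mr rest
        else if pvInnerA cs n p pattern (PySem.List.pyRange 1 needed 1) then
          some (String.ofList pattern, needed)
        else pvLoopA cs n mrc mr rest

def find_repeating_pattern_py (tail : String) (min_repeated_chars : Int) (min_repeats : Int) : Option (String × Int) :=
  let cs := tail.toList
  if cs = [] then none
  else
    let n := PySem.List.len cs
    pvLoopA cs n min_repeated_chars min_repeats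
      (PySem.List.pyRange 1 (PySem.Int.floordiv n min_repeats + 1) 1)

-- ===== PORT B =====
-- 'while i + k < n and rev[k] == rev[i + k]: k += 1'
def pvZwhile (rev : List Char) (i k : Nat) : Nat :=
  if h : i + k < rev.length ∧ rev.getD k ' ' = rev.getD (i + k) ' ' then pvZwhile rev i (k + 1)
  else k
termination_by rev.length - (i + k)
decreasing_by omega

-- body of 'for i in range(1, max_p + 1)': k0 from the z-box, extend, store z[i], update (l, r)
def pvZstep (rev : List Char) (st : List Nat × Nat × Nat) (i : Nat) : List Nat × Nat × Nat :=
  let k0 := if i < st.2.2 then min (st.1.getD (i - st.2.1) 0) (st.2.2 - i) else 0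
  let k := pvZwhile rev i k0
  (st.1 ++ [k], if st.2.2 < i + k then (i, i + k) else (st.2.1, st.2.2))

-- the Z-array z ('z = [0] * (max_p + 1); l = r = 0; for i in range(1, max_p + 1): ...')
def pvZbuild (rev : List Char) (m : Nat) : List Nat :=
  ((List.range' 1 m).foldl (pvZstep rev) ([0], 0, 0)).1

-- 'while ws < n and rev[ws].isspace(): ws += 1'
def pvWsLoop (rev : List Char) (ws : Nat) : Nat :=
  if h : ws < rev.length ∧ PySem.Chars.isspace (rev.getD ws ' ') then pvWsLoop rev (ws + 1)
  else ws
termination_by rev.length - ws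
decreasing_by omega

-- 'for p in range(1, max_p + 1)' with the arithmetic test on z[p]
def pvLoopB (rev : List Char) (z : List Nat) (ws : Nat) (n mrc mr : Int) : List Int → Option (String × Int)
  | [] => none
  | p :: rest =>
      let needed := max mr (PySem.Int.floordiv mrc p)
      let total := p * needed
      if total ≤ n ∧ (ws : Int) < p ∧ total - p ≤ (z.getD p.toNat 0 : Int) then
        some (String.ofList (PySem.List.slice rev none (some p)).reverse, needed)
      else pvLoopB rev z ws n mrc mr rest

def find_repeating_pattern_py_alt (tail : String) (min_repeated_chars : Int) (min_repeats : Int) : Option (String × Int) :=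
  let cs := tail.toList
  if cs = [] then none
  else
    let n := PySem.List.len cs
    let rev := cs.reverse
    let maxp := PySem.Int.floordiv n min_repeats
    let z := pvZbuild rev maxp.toNat
    let ws := pvWsLoop rev 0
    pvLoopB rev z ws n min_repeated_chars min_repeats (PySem.List.pyRange 1 (maxp + 1) 1)

-- ===== PRECONDITION & SPEC =====
-- A raises ZeroDivisionError ('len(tail) // min_repeats') when tail is nonempty and min_repeats = 0;
-- exactly those inputs are excluded (B raises there as well).
def Pre_find_repeating_pattern_py (tail : String) (min_repeated_chars : Int) (min_repeats : Int) : Prop :=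
  tail = "" ∨ min_repeats ≠ 0
instance (tail : String) (min_repeated_chars : Int) (min_repeats : Int) : Decidable (Pre_find_repeating_pattern_py tail min_repeated_chars min_repeats) := by unfold Pre_find_repeating_pattern_py; infer_instance

def pvWitness_find_repeating_pattern_py : String × Int × Int := ("abab", 2, 2)

def Spec_find_repeating_pattern_py (tail : String) (min_repeated_chars : Int) (min_repeats : Int) (out : Option (String × Int)) : Prop := out = find_repeating_pattern_py_alt tail min_repeated_chars min_repeats
instance (tail : String) (min_repeated_chars : Int) (min_repeats : Int) (out : Option (String × Int)) : Decidable (Spec_find_repeating_pattern_py tail min_repeated_chars min_repeats out) := by unfold Spec_find_repeating_pattern_py; infer_instance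

-- ===== CLAIM (what is proved, stated in full; the proofs are below) =====
def Claim_equal_find_repeating_pattern_py : Prop := ∀ (tail : String) (min_repeated_chars : Int) (min_repeats : Int), Dom_find_repeating_pattern_py tail min_repeated_chars min_repeats → Pre_find_repeating_pattern_py tail min_repeated_chars min_repeats → Spec_find_repeating_pattern_py tail min_repeated_chars min_repeats (find_repeating_pattern_py tail min_repeated_chars min_repeats)

-- ===== LEMMAS AND PROOFS =====

-- longest common prefix (the value z[i] describes: z[i] = pvLcp rev (rev.drop i))
def pvLcp : List Char → List Char → Nat
  | x :: xs, y :: ys => if x = y then pvLcp xs ys + 1 else 0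
  | _, _ => 0

lemma pvLcp_nil_right (xs : List Char) : pvLcp xs [] = 0 := by
  cases xs <;> rfl

lemma pvLcp_cons_self (x : Char) (xs ys : List Char) :
    pvLcp (x :: xs) (x :: ys) = pvLcp xs ys + 1 := by
  simp [pvLcp]

lemma pvLcp_le_right (xs ys : List Char) : pvLcp xs ys ≤ ys.length := by
  induction xs generalizing ys with
  | nil => simp [pvLcp]
  | cons x xs ih =>
    cases ys with
    | nil => simp [pvLcp_nil_right]
    | cons y ys =>
      by_cases h : x = y
      · simp only [pvLcp, if_pos h, List.length_cons]
        have := ih ys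
        omega
      · simp [pvLcp, h]

lemma take_eq_of_le_pvLcp (xs ys : List Char) (m : Nat) (h : m ≤ pvLcp xs ys) :
    xs.take m = ys.take m := by
  induction m generalizing xs ys with
  | zero => simp
  | succ k ih =>
    cases xs with
    | nil => cases ys <;> simp [pvLcp] at h
    | cons x xs =>
      cases ys with
      | nil => simp [pvLcp_nil_right] at h
      | cons y ys =>
        by_cases hxy : x = y
        · subst hxy
          rw [pvLcp_cons_self] at h
          simp [List.take_succ_cons, ih xs ys (by omega)]
        · simp [pvLcp, hxy] at h

lemma le_pvLcp_of_take_eq (xs ys : List Char) (m : Nat) (hx : m ≤ xs.length)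
    (hy : m ≤ ys.length) (h : xs.take m = ys.take m) : m ≤ pvLcp xs ys := by
  induction m generalizing xs ys with
  | zero => omega
  | succ k ih =>
    cases xs with
    | nil => simp at hx
    | cons x xs =>
      cases ys with
      | nil => simp at hy
      | cons y ys =>
        simp only [List.take_succ_cons, List.cons.injEq] at h
        obtain ⟨rfl, htl⟩ := h
        have := ih xs ys (by simpa using hx) (by simpa using hy) htl
        simp [pvLcp]
        omega

lemma pvLcp_split (xs ys : List Char) (k : Nat) (h : k ≤ pvLcp xs ys) :
    pvLcp xs ys = k + pvLcp (xs.drop k) (ys.drop k) := by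
  induction k generalizing xs ys with
  | zero => simp
  | succ j ih =>
    cases xs with
    | nil => cases ys <;> simp [pvLcp] at h
    | cons x xs =>
      cases ys with
      | nil => simp [pvLcp_nil_right] at h
      | cons y ys =>
        by_cases hxy : x = y
        · subst hxy
          rw [pvLcp_cons_self] at h
          rw [pvLcp_cons_self, List.drop_succ_cons, List.drop_succ_cons,
            ih xs ys (by omega)]
          omega
        · simp [pvLcp, hxy] at h

lemma pvZwhile_eq (rev : List Char) (i : Nat) (hi : 1 ≤ i) : ∀ k,
    pvZwhile rev i k = k + pvLcp (rev.drop k) (rev.drop (i + k)) := by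
  intro k
  induction hfuel : rev.length - (i + k) generalizing k with
  | zero =>
    have hge : rev.length ≤ i + k := by omega
    rw [pvZwhile, dif_neg (by intro hc; exact absurd hc.1 (by omega))]
    rw [List.drop_eq_nil_of_le hge, pvLcp_nil_right]
    omega
  | succ f ihf =>
    have hlt : i + k < rev.length := by omega
    have hk : k < rev.length := by omega
    rw [List.drop_eq_getElem_cons hk, List.drop_eq_getElem_cons hlt]
    by_cases hc : rev[k] = rev[i + k]
    · rw [pvZwhile, dif_pos ⟨hlt, by rw [List.getD_eq_getElem rev ' ' hk,
        List.getD_eq_getElem rev ' ' hlt]; exact hc⟩]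
      rw [ihf (k + 1) (by omega)]
      rw [hc, pvLcp_cons_self, show i + (k + 1) = i + k + 1 by omega]
      omega
    · rw [pvZwhile, dif_neg (by
        intro hcc
        rw [List.getD_eq_getElem rev ' ' hk, List.getD_eq_getElem rev ' ' hlt] at hcc
        exact hc hcc.2)]
      simp [pvLcp, hc]

lemma pvZwhile_restart (rev : List Char) (i k : Nat) (hi : 1 ≤ i)
    (hk : k ≤ pvLcp rev (rev.drop i)) :
    pvZwhile rev i k = pvLcp rev (rev.drop i) := by
  rw [pvZwhile_eq rev i hi k, pvLcp_split rev (rev.drop i) k hk, List.drop_drop]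

lemma window_shift (rev : List Char) (l r t : Nat)
    (hw : rev.take (r - l) = (rev.drop l).take (r - l)) (ht : t < r - l) :
    rev[t]? = rev[l + t]? := by
  have h1 := congrArg (fun xs => xs[t]?) hw
  simp only at h1
  rw [List.getElem?_take_of_lt ht, List.getElem?_take_of_lt ht, List.getElem?_drop] at h1
  exact h1

-- z-build invariant: z lists the true lcp values; (l, r) is a sound z-box
def pvZinv (rev : List Char) (t : Nat) (st : List Nat × Nat × Nat) : Prop :=
  st.1 = (List.range (t + 1)).map (fun j => if j = 0 then 0 else pvLcp rev (rev.drop j)) ∧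
  ((st.2.1 = 0 ∧ st.2.2 = 0) ∨
    (1 ≤ st.2.1 ∧ st.2.1 ≤ t ∧ st.2.2 - st.2.1 ≤ pvLcp rev (rev.drop st.2.1)))

lemma zvec_getD (rev : List Char) (t j : Nat) (hj1 : 1 ≤ j) (hjt : j ≤ t) :
    ((List.range (t + 1)).map (fun j => if j = 0 then 0 else pvLcp rev (rev.drop j))).getD j 0 =
      pvLcp rev (rev.drop j) := by
  rw [List.getD_eq_getElem?_getD, List.getElem?_map, List.getElem?_range (by omega)]
  simp only [Option.map_some, Option.getD_some]
  rw [if_neg (by omega)]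

lemma pvZstep_inv (rev : List Char) (t : Nat) (z : List Nat) (l r : Nat)
    (hinv : pvZinv rev t (z, l, r)) : pvZinv rev (t + 1) (pvZstep rev (z, l, r) (t + 1)) := by
  obtain ⟨hz, hlr⟩ := hinv
  simp only at hz hlr
  -- k0 is a sound starting point: the first k0 characters already match
  have hk0L : (if t + 1 < r then min (z.getD (t + 1 - l) 0) (r - (t + 1)) else 0) ≤
      pvLcp rev (rev.drop (t + 1)) := by
    by_cases hir : t + 1 < r
    · rw [if_pos hir]
      rcases hlr with ⟨rfl, rfl⟩ | ⟨hl1, hlt, hwin⟩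
      · omega
      · have hzj : z.getD (t + 1 - l) 0 = pvLcp rev (rev.drop (t + 1 - l)) := by
          rw [hz]; exact zvec_getD rev t (t + 1 - l) (by omega) (by omega)
        rw [hzj]
        set j := t + 1 - l with hj_def
        set m := min (pvLcp rev (rev.drop j)) (r - (t + 1)) with hm_def
        have hLl_len : pvLcp rev (rev.drop l) ≤ rev.length - l := by
          have := pvLcp_le_right rev (rev.drop l)
          simpa using this
        have hrlen : r ≤ rev.length := by omega
        have hwtake : rev.take (r - l) = (rev.drop l).take (r - l) :=
          take_eq_of_le_pvLcp _ _ _ hwin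
        have h1 : rev.take m = (rev.drop j).take m :=
          take_eq_of_le_pvLcp _ _ _ (by omega)
        have h2 : (rev.drop j).take m = (rev.drop (t + 1)).take m := by
          apply List.ext_getElem?_iff.mpr
          intro b
          by_cases hb : b < m
          · rw [List.getElem?_take_of_lt hb, List.getElem?_take_of_lt hb,
              List.getElem?_drop, List.getElem?_drop]
            have hb1 : j + b < r - l := by omega
            have e1 := window_shift rev l r (j + b) hwtake hb1
            rw [show l + (j + b) = t + 1 + b by omega] at e1
            have hb2 : b < r - l := by omega
            have e2 := window_shift rev l r b hwtake hb2
            rw [← e1]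
          · rw [List.getElem?_take_eq_none (by omega), List.getElem?_take_eq_none (by omega)]
        apply le_pvLcp_of_take_eq rev (rev.drop (t + 1)) m (by omega)
          (by simp; omega) (h1.trans h2)
    · rw [if_neg hir]; omega
  have hkL : pvZwhile rev (t + 1) (if t + 1 < r then min (z.getD (t + 1 - l) 0) (r - (t + 1)) else 0) =
      pvLcp rev (rev.drop (t + 1)) :=
    pvZwhile_restart rev (t + 1) _ (by omega) hk0L
  unfold pvZinv pvZstep
  simp only [hkL]
  constructor
  · rw [hz, show t + 1 + 1 = (t + 1) + 1 from rfl, List.range_succ (n := t + 1), List.map_append]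
    simp only [List.map_cons, List.map_nil, List.append_cancel_left_eq]
    rw [if_neg (by omega)]
  · by_cases hupd : r < t + 1 + pvLcp rev (rev.drop (t + 1))
    · rw [if_pos hupd]
      right
      dsimp only
      exact ⟨by omega, by omega, by omega⟩
    · rw [if_neg hupd]
      dsimp only
      rcases hlr with ⟨rfl, rfl⟩ | ⟨hl1, hlt, hwin⟩
      · left; exact ⟨rfl, rfl⟩
      · right; exact ⟨hl1, by omega, hwin⟩

lemma pvZbuild_inv (rev : List Char) (m : Nat) :
    pvZinv rev m ((List.range' 1 m).foldl (pvZstep rev) ([0], 0, 0)) := by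
  induction m with
  | zero => exact ⟨rfl, Or.inl ⟨rfl, rfl⟩⟩
  | succ t ih =>
    rw [List.range'_1_concat, List.foldl_append, List.foldl_cons, List.foldl_nil,
      show 1 + t = t + 1 from Nat.add_comm 1 t]
    obtain ⟨⟨z, l, r⟩, hst⟩ : ∃ st, (List.range' 1 t).foldl (pvZstep rev) ([0], 0, 0) = st :=
      ⟨_, rfl⟩
    rw [hst]
    rw [hst] at ih
    exact pvZstep_inv rev t z l r ih

lemma pvZbuild_getD (rev : List Char) (m j : Nat) (hj1 : 1 ≤ j) (hjm : j ≤ m) :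
    (pvZbuild rev m).getD j 0 = pvLcp rev (rev.drop j) := by
  have h := (pvZbuild_inv rev m).1
  rw [pvZbuild, h]
  exact zvec_getD rev m j hj1 hjm

-- whitespace loop computes the leading-whitespace count
lemma pvWsLoop_eq (rev : List Char) : ∀ k,
    pvWsLoop rev k = k + ((rev.drop k).takeWhile PySem.Chars.isspace).length := by
  intro k
  induction hfuel : rev.length - k generalizing k with
  | zero =>
    have hge : rev.length ≤ k := by omega
    rw [pvWsLoop, dif_neg (by intro hc; exact absurd hc.1 (by omega))]
    rw [List.drop_eq_nil_of_le hge]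
    simp
  | succ f ihf =>
    have hk : k < rev.length := by omega
    have hdk : rev.drop k = rev[k] :: rev.drop (k + 1) := List.drop_eq_getElem_cons hk
    by_cases hsp : PySem.Chars.isspace rev[k]
    · rw [pvWsLoop, dif_pos ⟨hk, by rw [List.getD_eq_getElem rev ' ' hk]; exact hsp⟩]
      rw [ihf (k + 1) (by omega), hdk, List.takeWhile_cons, if_pos hsp, List.length_cons]
      omega
    · rw [pvWsLoop, dif_neg (by
        intro hc
        rw [List.getD_eq_getElem rev ' ' hk] at hc
        exact hsp hc.2)]
      rw [hdk, List.takeWhile_cons, if_neg hsp]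
      simp

lemma strip_eq_nil_iff (l : List Char) :
    PySem.Chars.strip l = [] ↔ l.all PySem.Chars.isspace = true := by
  unfold PySem.Chars.strip PySem.Chars.rstrip PySem.Chars.lstrip
  rw [List.reverse_eq_nil_iff, List.dropWhile_eq_nil_iff]
  constructor
  · intro h
    rw [List.all_eq_true]
    intro x hx
    rcases List.mem_append.mp ((List.takeWhile_append_dropWhile (p := PySem.Chars.isspace) (l := l)) ▸ hx) with h1 | h2
    · exact List.mem_takeWhile_imp h1
    · exact h x (List.mem_reverse.mpr h2)
  · intro h x hx
    exact (List.all_eq_true.mp h) x (List.dropWhile_subset _ (List.mem_reverse.mp hx))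

lemma take_all_iff_le_takeWhile (P : Char → Bool) (l : List Char) (p : Nat) (hp : p ≤ l.length) :
    (l.take p).all P = true ↔ p ≤ (l.takeWhile P).length := by
  induction l generalizing p with
  | nil => simp at hp; simp [hp]
  | cons c rest ih =>
    cases p with
    | zero => simp
    | succ q =>
      by_cases h : P c
      · simp [List.takeWhile_cons, h, ih q (by simpa using hp), Nat.succ_le_succ_iff]
      · simp [List.takeWhile_cons, h]

lemma ws_iff (cs : List Char) (p : Int) (hp : 1 ≤ p) (hn : p ≤ (cs.length : Int)) :
    PySem.Chars.strip (PySem.List.slice cs (some (-p)) none) = [] ↔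
      p ≤ ((cs.reverse.takeWhile PySem.Chars.isspace).length : Int) := by
  obtain ⟨P, rfl⟩ : ∃ P : Nat, p = (P : Int) := ⟨p.toNat, (Int.toNat_of_nonneg (by omega)).symm⟩
  have hP : 0 < P := by exact_mod_cast hp
  have hPn : P ≤ cs.length := by exact_mod_cast hn
  rw [PySem.List.slice_from_neg_natCast cs P hP, strip_eq_nil_iff]
  have hdrop : cs.drop (cs.length - P) = (cs.reverse.take P).reverse := by
    rw [← List.reverse_reverse (cs.drop (cs.length - P)), List.reverse_drop]
    simp
    omega
  rw [hdrop, List.all_reverse,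
    take_all_iff_le_takeWhile _ _ P (by simpa using hPn)]
  omega

-- ===== A's inner loop ↔ the overlap-slice equality (bridge shared by both directions) =====
lemma pvInnerA_eq_all (cs : List Char) (n p : Int) (pat : List Char) (ps : List Int) :
    pvInnerA cs n p pat ps =
      ps.all (fun i =>
        !(decide (n - p * (i + 1) < 0) ||
          decide (PySem.List.slice cs (some (n - p * (i + 1))) (some (n - p * (i + 1) + p)) ≠ pat))) := by
  induction ps with
  | nil => rfl
  | cons i rest ih =>
    simp only [pvInnerA, List.all_cons, ih]
    by_cases h : n - p * (i + 1) < 0 ∨ PySem.List.slice cs (some (n - p * (i + 1))) (some (n - p * (i + 1) + p)) ≠ pat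
    · rcases h with h | h <;> simp [h]
    · push_neg at h
      simp [h.2, not_lt.mpr h.1]

lemma overlap_iff_shift (t : List Char) (P K : Nat) (hl : t.length = K * P) :
    (t.take ((K - 1) * P) = t.drop P) ↔ (∀ j, j + P < K * P → t[j]? = t[j + P]?) := by
  have hsub : (K - 1) * P = K * P - P := by rw [Nat.sub_mul, one_mul]
  rw [hsub]
  constructor
  · intro h j hj
    have h1 : (t.take (K * P - P))[j]? = (t.drop P)[j]? := by rw [h]
    rw [List.getElem?_take_of_lt (by omega), List.getElem?_drop] at h1
    rw [h1]; ring_nf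
  · intro h
    apply List.ext_getElem?_iff.mpr
    intro j
    by_cases hj : j < K * P - P
    · rw [List.getElem?_take_of_lt hj, List.getElem?_drop]
      have := h j (by omega)
      rw [this]; ring_nf
    · rw [List.getElem?_take_eq_none (by omega), List.getElem?_eq_none (by simp; omega)]

lemma block_getElem? (t : List Char) (P a b : Nat) :
    ((t.drop (a * P)).take P)[b]? = if b < P then t[a * P + b]? else none := by
  by_cases hb : b < P
  · rw [List.getElem?_take_of_lt hb, List.getElem?_drop, if_pos hb]
  · rw [List.getElem?_take_eq_none (by omega), if_neg hb]

lemma blocks_iff_shift (t : List Char) (P K : Nat) (hl : t.length = K * P) (hP : 1 ≤ P) :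
    (∀ a, a < K → (t.drop (a * P)).take P = t.drop ((K - 1) * P)) ↔
      (∀ j, j + P < K * P → t[j]? = t[j + P]?) := by
  have hpat : ∀ b : Nat, (t.drop ((K - 1) * P))[b]? = if b < P then t[(K - 1) * P + b]? else none := by
    intro b
    by_cases hb : b < P
    · rw [List.getElem?_drop, if_pos hb]
    · rw [if_neg hb, List.getElem?_eq_none]
      simp only [List.length_drop, hl, Nat.sub_mul, one_mul]
      omega
  constructor
  · intro h j hj
    have hb : j % P < P := Nat.mod_lt _ (by omega)
    have hj' : j / P * P + j % P = j := Nat.div_add_mod' j P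
    have ha1 : j / P + 1 < K := by
      have h1 : j / P * P ≤ j := Nat.div_mul_le_self j P
      by_contra hc
      have h2 : K ≤ j / P + 1 := by omega
      have h3 : K * P ≤ (j / P + 1) * P := Nat.mul_le_mul_right _ h2
      rw [Nat.add_mul, one_mul] at h3
      omega
    have e1 := h (j / P) (by omega)
    have e2 := h (j / P + 1) ha1
    have g1 : t[j]? = t[(K - 1) * P + j % P]? := by
      have := congrArg (fun l => l[j % P]?) e1
      simp only [block_getElem? , hpat, if_pos hb] at this
      rw [hj'] at this; exact this
    have g2 : t[j + P]? = t[(K - 1) * P + j % P]? := by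
      have := congrArg (fun l => l[j % P]?) e2
      simp only [block_getElem? , hpat, if_pos hb] at this
      have hjp : (j / P + 1) * P + j % P = j + P := by
        rw [Nat.add_mul, one_mul, Nat.add_right_comm, hj']
      rw [hjp] at this; exact this
    rw [g1, g2]
  · intro h
    have adj : ∀ a, a + 1 < K → (t.drop (a * P)).take P = (t.drop ((a + 1) * P)).take P := by
      intro a ha
      apply List.ext_getElem?_iff.mpr
      intro b
      rw [block_getElem?, block_getElem?]
      by_cases hb : b < P
      · rw [if_pos hb, if_pos hb]
        have hx : a * P + b + P < K * P := by
          have : (a + 2) * P ≤ K * P := Nat.mul_le_mul_right _ (by omega)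
          have h2 : a * P + b + P < (a + 2) * P := by
            simp only [Nat.add_mul]; omega
          omega
        have := h (a * P + b) hx
        rw [this]
        congr 1
        simp only [Nat.add_mul, one_mul]; omega
      · rw [if_neg hb, if_neg hb]
    have last : (t.drop ((K - 1) * P)).take P = t.drop ((K - 1) * P) := by
      apply List.take_of_length_le
      simp only [List.length_drop, hl, Nat.sub_mul, one_mul]
      omega
    have main : ∀ d, d < K → (t.drop ((K - 1 - d) * P)).take P = t.drop ((K - 1) * P) := by
      intro d
      induction d with
      | zero => intro _; simpa using last
      | succ e ih =>
        intro hd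
        have hstep : (K - 1 - (e + 1)) + 1 = K - 1 - e := by omega
        have := adj (K - 1 - (e + 1)) (by omega)
        rw [hstep] at this
        rw [this]
        exact ih (by omega)
    intro a ha
    have := main (K - 1 - a) (by omega)
    rw [show K - 1 - (K - 1 - a) = a by omega] at this
    exact this

lemma inner_iff_overlap (cs : List Char) (p needed : Int) (hp : 1 ≤ p) (hneed : 1 ≤ needed)
    (htot : p * needed ≤ (cs.length : Int)) :
    (pvInnerA cs (cs.length : Int) p (PySem.List.slice cs (some (-p)) none)
        (PySem.List.pyRange 1 needed 1) = true) ↔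
      PySem.List.slice cs (some ((cs.length : Int) - p * needed)) (some ((cs.length : Int) - p)) =
        PySem.List.slice cs (some ((cs.length : Int) - p * needed + p)) none := by
  obtain ⟨P, rfl⟩ : ∃ P : Nat, p = (P : Int) := ⟨p.toNat, (Int.toNat_of_nonneg (by omega)).symm⟩
  obtain ⟨K, rfl⟩ : ∃ K : Nat, needed = (K : Int) := ⟨needed.toNat, (Int.toNat_of_nonneg (by omega)).symm⟩
  have hP : 1 ≤ P := by exact_mod_cast hp
  have hK : 1 ≤ K := by exact_mod_cast hneed
  have hc1 : (P : Int) * (K : Int) = ((K * P : Nat) : Int) := by push_cast; ring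
  rw [hc1] at htot
  have hKP : K * P ≤ cs.length := by exact_mod_cast htot
  have hPM : P ≤ K * P := Nat.le_mul_of_pos_left P (by omega)
  have hPL : P ≤ cs.length := le_trans hPM hKP
  have hsub : (K - 1) * P = K * P - P := by rw [Nat.sub_mul, one_mul]
  have arith1 : ∀ L M Q : Nat, Q ≤ M → M ≤ L → L - Q = L - M + (M - Q) := by intros; omega
  have arith2 : ∀ L M Q : Nat, Q ≤ M → M ≤ L → L - Q - (L - M) = M - Q := by intros; omega
  have arith3 : ∀ M Q : Nat, M - (M - Q) ≤ Q := by intros; omega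
  set t := cs.drop (cs.length - K * P) with ht_def
  have ht : t.length = K * P := by
    rw [ht_def, List.length_drop]; exact Nat.sub_sub_self hKP
  have hdd : ∀ m : Nat, t.drop m = cs.drop (cs.length - K * P + m) := by
    intro m; rw [ht_def, List.drop_drop, Nat.add_comm]
  have hpat : PySem.List.slice cs (some (-(P : Int))) none = t.drop ((K - 1) * P) := by
    rw [PySem.List.slice_from_neg_natCast cs P (by omega), hdd, hsub]
    congr 1
    exact arith1 cs.length (K * P) P hPM hKP
  have ec1 : (cs.length : Int) - ((K * P : Nat) : Int) = ((cs.length - K * P : Nat) : Int) := by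
    rw [Nat.cast_sub hKP]
  have ec2 : (cs.length : Int) - ((P : Nat) : Int) = ((cs.length - P : Nat) : Int) := by
    rw [Nat.cast_sub hPL]
  have ec3 : ((cs.length - K * P : Nat) : Int) + ((P : Nat) : Int) =
      ((cs.length - K * P + P : Nat) : Int) := by
    rw [Nat.cast_add]
  rw [hc1, ec1, ec2, ec3, PySem.List.slice_natCast, PySem.List.slice_from_natCast]
  have hrw1 : List.take (cs.length - P - (cs.length - K * P)) (List.drop (cs.length - K * P) cs) =
      t.take ((K - 1) * P) := by
    rw [ht_def, hsub]
    congr 1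
    exact arith2 cs.length (K * P) P hPM hKP
  have hrw2 : List.drop (cs.length - K * P + P) cs = t.drop P := (hdd P).symm
  rw [hrw1, hrw2, hpat]
  rw [pvInnerA_eq_all, List.all_eq_true]
  rw [overlap_iff_shift t P K ht, ← blocks_iff_shift t P K ht hP]
  constructor
  · intro h a ha
    by_cases haK : a = K - 1
    · subst haK
      apply List.take_of_length_le
      rw [List.length_drop, ht, hsub]
      exact arith3 (K * P) P
    · have hi : ((K - 1 - a : Nat) : Int) ∈ PySem.List.pyRange 1 (K : Int) 1 := by
        rw [PySem.List.mem_pyRange_one]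
        constructor
        · omega
        · omega
      have hx := h ((K - 1 - a : Nat) : Int) hi
      have eS : ((K - 1 - a : Nat) : Int) + 1 = ((K - a : Nat) : Int) := by omega
      have eP2 : (P : Int) * ((K - a : Nat) : Int) = (((K - a) * P : Nat) : Int) := by
        push_cast; ring
      have e : (K - a) * P + a * P = K * P := by
        rw [← Nat.add_mul]; congr 1; omega
      have ecast : (((K - a) * P : Nat) : Int) + ((a * P : Nat) : Int) = ((K * P : Nat) : Int) := by
        rw [← Nat.cast_add, e]
      have eidx : (cs.length : Int) - (P : Int) * (((K - 1 - a : Nat) : Int) + 1) =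
          ((cs.length - K * P + a * P : Nat) : Int) := by
        rw [eS, eP2]
        have er : ((cs.length - K * P + a * P : Nat) : Int) =
            ((cs.length : Int) - ((K * P : Nat) : Int)) + ((a * P : Nat) : Int) := by
          rw [Nat.cast_add, Nat.cast_sub hKP]
        rw [er]
        omega
      simp only [Bool.not_or, Bool.and_eq_true, Bool.not_eq_true', decide_eq_false_iff_not,
        Decidable.not_not] at hx
      obtain ⟨-, hslice⟩ := hx
      rw [eidx, ← Nat.cast_add, PySem.List.slice_natCast, Nat.add_sub_cancel_left, ← hdd] at hslice
      exact hslice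
  · intro hblocks i hi
    rw [PySem.List.mem_pyRange_one] at hi
    obtain ⟨I, rfl⟩ : ∃ I : Nat, i = (I : Int) := ⟨i.toNat, (Int.toNat_of_nonneg (by omega)).symm⟩
    have hI1 : 1 ≤ I := by exact_mod_cast hi.1
    have hIK : I < K := by exact_mod_cast hi.2
    have eI : ((I : Int) + 1) = ((I + 1 : Nat) : Int) := by push_cast; ring
    have eprod : (P : Int) * ((I + 1 : Nat) : Int) = (((I + 1) * P : Nat) : Int) := by
      push_cast; ring
    have hle : (I + 1) * P ≤ K * P := Nat.mul_le_mul_right _ (by omega)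
    have eidx : (cs.length : Int) - (((I + 1) * P : Nat) : Int) =
        ((cs.length - (I + 1) * P : Nat) : Int) := by
      rw [Nat.cast_sub (le_trans hle hKP)]
    simp only [eI, eprod, eidx, Bool.not_or, Bool.and_eq_true, Bool.not_eq_true',
      decide_eq_false_iff_not, Decidable.not_not]
    refine ⟨by omega, ?_⟩
    have hblk := hblocks (K - 1 - I) (by omega)
    have e : (K - 1 - I) * P + (I + 1) * P = K * P := by
      rw [← Nat.add_mul]; congr 1; omega
    have earg : cs.length - (I + 1) * P = cs.length - K * P + (K - 1 - I) * P := by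
      have h1 := arith1 cs.length (K * P) ((I + 1) * P) hle hKP
      omega
    have eP : ((cs.length - (I + 1) * P : Nat) : Int) + (P : Int) =
        ((cs.length - (I + 1) * P + P : Nat) : Int) := by rw [Nat.cast_add]
    rw [eP, PySem.List.slice_natCast, Nat.add_sub_cancel_left, earg, ← hdd]
    exact hblk

-- overlap-slice equality ↔ the Z-value test on the reversed string
lemma sliceEq_iff_lcp (cs : List Char) (p needed : Int) (hp : 1 ≤ p) (hneed : 1 ≤ needed)
    (htot : p * needed ≤ (cs.length : Int)) :
    (PySem.List.slice cs (some ((cs.length : Int) - p * needed)) (some ((cs.length : Int) - p)) =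
        PySem.List.slice cs (some ((cs.length : Int) - p * needed + p)) none) ↔
      p * needed - p ≤ (pvLcp cs.reverse (cs.reverse.drop p.toNat) : Int) := by
  obtain ⟨P, rfl⟩ : ∃ P : Nat, p = (P : Int) := ⟨p.toNat, (Int.toNat_of_nonneg (by omega)).symm⟩
  obtain ⟨K, rfl⟩ : ∃ K : Nat, needed = (K : Int) := ⟨needed.toNat, (Int.toNat_of_nonneg (by omega)).symm⟩
  have hP : 1 ≤ P := by exact_mod_cast hp
  have hK : 1 ≤ K := by exact_mod_cast hneed
  have hc1 : (P : Int) * (K : Int) = ((K * P : Nat) : Int) := by push_cast; ring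
  rw [hc1] at htot ⊢
  have hKP : K * P ≤ cs.length := by exact_mod_cast htot
  have hPT : P ≤ K * P := Nat.le_mul_of_pos_left P (by omega)
  have hPN : P ≤ cs.length := le_trans hPT hKP
  have ec1 : (cs.length : Int) - ((K * P : Nat) : Int) = ((cs.length - K * P : Nat) : Int) := by
    rw [Nat.cast_sub hKP]
  have ec2 : (cs.length : Int) - ((P : Nat) : Int) = ((cs.length - P : Nat) : Int) := by
    rw [Nat.cast_sub hPN]
  have ec3 : ((cs.length - K * P : Nat) : Int) + ((P : Nat) : Int) =
      ((cs.length - K * P + P : Nat) : Int) := by rw [Nat.cast_add]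
  have ec4 : ((K * P : Nat) : Int) - ((P : Nat) : Int) = ((K * P - P : Nat) : Int) := by
    rw [Nat.cast_sub hPT]
  rw [ec1, ec2, ec3, ec4, PySem.List.slice_natCast, PySem.List.slice_from_natCast,
    Int.toNat_natCast, Nat.cast_le]
  have e1 : cs.length - P - (cs.length - K * P) = K * P - P := by omega
  rw [e1]
  have hlen1 : K * P - P ≤ cs.reverse.length := by simp; omega
  have hlen2 : K * P - P ≤ (cs.reverse.drop P).length := by simp; omega
  have hA : cs.reverse.take (K * P - P) = (cs.drop (cs.length - K * P + P)).reverse := by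
    rw [List.take_reverse, show cs.length - (K * P - P) = cs.length - K * P + P by omega]
  have hB : (cs.reverse.drop P).take (K * P - P) =
      ((cs.drop (cs.length - K * P)).take (K * P - P)).reverse := by
    rw [List.drop_reverse, List.take_reverse, List.length_take,
      min_eq_left (by omega : cs.length - P ≤ cs.length),
      show cs.length - P - (K * P - P) = cs.length - K * P by omega, List.drop_take, e1]
  constructor
  · intro h
    apply le_pvLcp_of_take_eq cs.reverse (cs.reverse.drop P) (K * P - P) hlen1 hlen2
    rw [hA, ← h, ← hB]
  · intro h
    have hte := take_eq_of_le_pvLcp cs.reverse (cs.reverse.drop P) (K * P - P) h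
    rw [hA, hB] at hte
    exact (List.reverse_inj.mp hte).symm

-- A's candidate loop ↔ B's candidate loop, pointwise over the shared candidate list
lemma loop_eq (cs : List Char) (mrc mr maxp : Int) (hmr : 1 ≤ mr) (hmaxp : 0 ≤ maxp)
    (ps : List Int) (hmem : ∀ p ∈ ps, 1 ≤ p ∧ p ≤ maxp) :
    pvLoopA cs (cs.length : Int) mrc mr ps =
      pvLoopB cs.reverse (pvZbuild cs.reverse maxp.toNat) (pvWsLoop cs.reverse 0)
        (cs.length : Int) mrc mr ps := by
  induction ps with
  | nil => rfl
  | cons p rest ih =>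
    obtain ⟨hp, hpm⟩ := hmem p List.mem_cons_self
    have ihr := ih (fun q hq => hmem q (List.mem_cons_of_mem _ hq))
    simp only [pvLoopA, pvLoopB]
    set needed := max mr (PySem.Int.floordiv mrc p) with hneed_def
    have hneed : 1 ≤ needed := le_trans hmr (le_max_left _ _)
    have hws0 : pvWsLoop cs.reverse 0 = (cs.reverse.takeWhile PySem.Chars.isspace).length := by
      rw [pvWsLoop_eq]; simp
    by_cases h1 : p * needed > (cs.length : Int)
    · rw [if_pos h1, if_neg (by intro hc; omega)]
      exact ihr
    · have htot : p * needed ≤ (cs.length : Int) := not_lt.mp h1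
      have hpn : p ≤ (cs.length : Int) := by
        have : p * 1 ≤ p * needed := by
          apply mul_le_mul_of_nonneg_left hneed (by omega)
        omega
      rw [if_neg h1]
      by_cases h2 : PySem.Chars.strip (PySem.List.slice cs (some (-p)) none) = []
      · have hle : p ≤ ((cs.reverse.takeWhile PySem.Chars.isspace).length : Int) :=
          (ws_iff cs p hp hpn).mp h2
        rw [if_pos h2, if_neg (by intro hc; rw [hws0] at hc; omega)]
        exact ihr
      · have hgt : ((pvWsLoop cs.reverse 0 : Nat) : Int) < p := by
          rw [hws0]
          by_contra hc
          push_neg at hc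
          exact h2 ((ws_iff cs p hp hpn).mpr hc)
        have hzl : ((pvZbuild cs.reverse maxp.toNat).getD p.toNat 0 : Nat) =
            pvLcp cs.reverse (cs.reverse.drop p.toNat) :=
          pvZbuild_getD cs.reverse maxp.toNat p.toNat (by omega) (by omega)
        rw [if_neg h2]
        by_cases h3 : pvInnerA cs (cs.length : Int) p (PySem.List.slice cs (some (-p)) none)
            (PySem.List.pyRange 1 needed 1) = true
        · have hlcp := (sliceEq_iff_lcp cs p needed hp hneed htot).mp
            ((inner_iff_overlap cs p needed hp hneed htot).mp h3)
          rw [hzl] at *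
          rw [if_pos h3, if_pos ⟨htot, hgt, hlcp⟩]
          have hval : (PySem.List.slice cs.reverse none (some p)).reverse =
              PySem.List.slice cs (some (-p)) none := by
            obtain ⟨P, rfl⟩ : ∃ P : Nat, p = (P : Int) :=
              ⟨p.toNat, (Int.toNat_of_nonneg (by omega)).symm⟩
            have hP : 0 < P := by exact_mod_cast hp
            rw [PySem.List.slice_to_natCast, PySem.List.slice_from_neg_natCast cs P hP,
              List.take_reverse, List.reverse_reverse]
          rw [hval]
        · rw [if_neg h3, if_neg (by
            intro hc
            rw [hzl] at hc
            exact h3 ((inner_iff_overlap cs p needed hp hneed htot).mpr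
              ((sliceEq_iff_lcp cs p needed hp hneed htot).mpr hc.2.2)))]
          exact ihr

-- main equivalence on Pre_
lemma main_thm (tail : String) (mrc mr : Int)
    (hpre : tail = "" ∨ mr ≠ 0) :
    find_repeating_pattern_py tail mrc mr = find_repeating_pattern_py_alt tail mrc mr := by
  unfold find_repeating_pattern_py find_repeating_pattern_py_alt
  by_cases h : tail.toList = []
  · simp [h]
  · rw [if_neg h, if_neg h]
    dsimp only
    have hmr : mr ≠ 0 := by
      rcases hpre with h0 | h0
      · exact absurd (by rw [h0]; rfl) h
      · exact h0
    have hn1 : 1 ≤ (tail.toList.length : Int) := by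
      have : tail.toList ≠ [] := h
      have := List.length_pos_iff.mpr this
      omega
    rw [PySem.List.len_eq]
    rcases Int.lt_or_le mr 0 with hneg | hpos
    · have hfd : PySem.Int.floordiv (tail.toList.length : Int) mr ≤ -1 := by
        by_contra hc
        push_neg at hc
        have hq : 0 ≤ PySem.Int.floordiv (tail.toList.length : Int) mr := by omega
        have hmul := PySem.Int.floordiv_mul_add_mod (tail.toList.length : Int) mr
        have hb := PySem.Int.mod_neg_bounds (tail.toList.length : Int) hneg
        nlinarith [hq, hneg, hmul, hb.1, hb.2]
      rw [PySem.List.pyRange_one_eq_nil (by omega)]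
      rfl
    · have hmr1 : 1 ≤ mr := by omega
      have hmaxp : 0 ≤ PySem.Int.floordiv (tail.toList.length : Int) mr := by
        have hmul := PySem.Int.floordiv_mul_add_mod (tail.toList.length : Int) mr
        have hmod := PySem.Int.mod_lt (tail.toList.length : Int) (by omega : (0:Int) < mr)
        nlinarith [PySem.Int.mod_nonneg (tail.toList.length : Int) (by omega : (0:Int) < mr)]
      apply loop_eq tail.toList mrc mr _ hmr1 hmaxp
      intro p hp
      rw [PySem.List.mem_pyRange_one] at hp
      exact ⟨hp.1, by omega⟩

-- ===== VERDICT (by name: the statement is the Claim_ definition above) =====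
theorem find_repeating_pattern_py_spec : Claim_equal_find_repeating_pattern_py := by
  intro tail mrc mr _ hpre
  unfold Spec_find_repeating_pattern_py
  exact main_thm tail mrc mr hpre
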